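-- pv_equiv track=rewrite | github.com/VidhiDamani/MelodyMorph-AI | backend/feature_extraction/midi_parser.py | _identify_track_types
-- ===== SOURCE A (Python) =====
-- from typing import List, Dict, Tuple
--
-- def _identify_track_types(tracks: List) -> List[str]:
--     """Identify instrument types"""
--     track_types = []
--
--     for i, track in enumerate(tracks):
--         if i == 0:
--             track_types.append('drums')
--         elif i == 1:
--             track_types.append('bass')
--         else:
--             track_types.append('melody')
--
--     return track_types
-- ===== SOURCE B (Python) =====
-- def _identify_track_types(tracks):
--     """Identify instrument types"""
--     n = len(tracks)
--     return ['drums', 'bass'][:n] + ['melody'] * max(0, n - 2)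
-- ===== Notes on version B (the rewrite author's own statement) =====
-- stated objective: simpler
-- what changed: Replaces the enumerate loop with per-index if/elif/else by a closed-form construction: a slice of the fixed ['drums','bass'] prefix plus list multiplication for the 'melody' tail.
import Mathlib
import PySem

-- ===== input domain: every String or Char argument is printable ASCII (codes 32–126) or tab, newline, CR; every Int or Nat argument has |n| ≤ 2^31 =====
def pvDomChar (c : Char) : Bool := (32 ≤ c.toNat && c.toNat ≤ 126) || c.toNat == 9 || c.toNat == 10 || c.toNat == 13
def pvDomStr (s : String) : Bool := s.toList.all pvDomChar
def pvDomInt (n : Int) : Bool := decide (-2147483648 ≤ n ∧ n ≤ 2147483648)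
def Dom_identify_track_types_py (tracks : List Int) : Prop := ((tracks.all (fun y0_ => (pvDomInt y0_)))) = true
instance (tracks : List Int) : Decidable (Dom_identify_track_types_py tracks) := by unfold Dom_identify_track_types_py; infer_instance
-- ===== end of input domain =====

-- ===== PORT A =====
-- literal port of A: enumerate loop appending per-index label
def identify_track_types_py (tracks : List Int) : List String :=
  (PySem.List.enumerate tracks).foldl
    (fun track_types it =>
      if it.1 = 0 then track_types ++ ["drums"]
      else if it.1 = 1 then track_types ++ ["bass"]
      else track_types ++ ["melody"])
    []

-- ===== PORT B =====
-- port of B: slice of fixed prefix plus replication (closed form, no per-element branching)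
def identify_track_types_py_alt (tracks : List Int) : List String :=
  PySem.List.slice ["drums", "bass"] none (some (tracks.length : Int))
    ++ List.replicate (max 0 (tracks.length - 2)) "melody"

-- ===== PRECONDITION & SPEC =====
def Spec_identify_track_types_py (tracks : List Int) (out : List String) : Prop := out = identify_track_types_py_alt tracks
instance (tracks : List Int) (out : List String) : Decidable (Spec_identify_track_types_py tracks out) := by unfold Spec_identify_track_types_py; infer_instance

-- ===== CLAIM (what is proved, stated in full; the proofs are below) =====
def Claim_equal_identify_track_types_py : Prop := ∀ (tracks : List Int), Dom_identify_track_types_py tracks → Spec_identify_track_types_py tracks (identify_track_types_py tracks)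

-- ===== LEMMAS AND PROOFS =====


-- characterisation of A's enumerate-fold, generalised over the start index and accumulator
theorem foldl_enumFrom_label (l : List Int) : ∀ (i : Nat) (acc : List String),
    (PySem.List.enumerate l (i : Int)).foldl
      (fun track_types it =>
        if it.1 = 0 then track_types ++ ["drums"]
        else if it.1 = 1 then track_types ++ ["bass"]
        else track_types ++ ["melody"]) acc
    = acc ++ (if i = 0 ∧ 1 ≤ l.length then ["drums"] else [])
          ++ (if i ≤ 1 ∧ 2 ≤ i + l.length then ["bass"] else [])
          ++ List.replicate (l.length - (2 - i)) "melody" := by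
  induction l with
  | nil =>
    intro i acc
    simp only [PySem.List.enumerate_nil, List.foldl_nil, List.length_nil]
    simp
  | cons x xs ih =>
    intro i acc
    rw [PySem.List.enumerate_cons, List.foldl_cons]
    have hc : (i : Int) + 1 = ((i + 1 : Nat) : Int) := by push_cast; ring
    rw [hc, ih (i + 1)]
    match i with
    | 0 =>
      by_cases h : 1 ≤ xs.length
      · have e1 : xs.length + 1 - (2 - 0) = xs.length - 1 := by omega
        have h2 : 2 ≤ 1 + xs.length := by omega
        simp [h, e1, h2]
      · have e0 : xs.length = 0 := by omega
        simp [e0]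
    | 1 =>
      have e1 : xs.length + 1 - (2 - 1) = xs.length - (2 - 2) := by omega
      have h2 : 2 ≤ 1 + (xs.length + 1) := by omega
      norm_num [e1, h2]
    | (k + 2) =>
      have h1 : ¬ ((k + 2 : Int) = 0) := by omega
      have h2 : ¬ ((k + 2 : Int) = 1) := by omega
      push_cast
      simp [h1, h2, List.replicate_succ]

theorem alt_closed (tracks : List Int) :
    identify_track_types_py_alt tracks
      = List.take tracks.length ["drums", "bass"]
          ++ List.replicate (tracks.length - 2) "melody" := by
  unfold identify_track_types_py_alt
  rw [PySem.List.slice_to_natCast]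
  have hm : max 0 (tracks.length - 2) = tracks.length - 2 := by omega
  rw [hm]

theorem portA_eq_portB (tracks : List Int) :
    identify_track_types_py tracks = identify_track_types_py_alt tracks := by
  rw [alt_closed]
  unfold identify_track_types_py
  have h := foldl_enumFrom_label tracks 0 []
  norm_num at h
  rw [h]
  rcases tracks with _ | ⟨a, _ | ⟨b, xs⟩⟩
  · simp
  · simp
  · have e : xs.length + 1 + 1 - 2 = xs.length := by omega
    simp [e]

-- ===== VERDICT (by name: the statement is the Claim_ definition above) =====
theorem identify_track_types_py_spec : Claim_equal_identify_track_types_py := by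
  intro tracks _
  unfold Spec_identify_track_types_py
  exact portA_eq_portB tracks
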